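-- pv_equiv track=rewrite | github.com/NikitaFedyanin/python_tests | checkio/oreilly/elementary/majority.py | is_majority
-- ===== SOURCE A (Python) =====
-- def is_majority(items: list[bool]) -> bool:
--     true_v, false_v = 0, 0
--     for item in items:
--         if item:
--             true_v += 1
--         else:
--             false_v += 1
--     return bool(items) and true_v > false_v
-- ===== SOURCE B (Python) =====
-- def is_majority(items: list[bool]) -> bool:
--     # Majority-of-booleans via the sorted median: after sorting (False < True),
--     # the lower-median element is True exactly when Trues strictly outnumber Falses.
--     return bool(items) and sorted(items)[(len(items) - 1) // 2]
-- ===== Notes on version B (the rewrite author's own statement) =====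
-- stated objective: alternative
-- what changed: Replaces A's counting loop by a sort-and-pick-median algorithm: sort the booleans and return the lower-median element sorted(items)[(len(items)-1)//2], which is True exactly when Trues strictly outnumber Falses.
import Mathlib
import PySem

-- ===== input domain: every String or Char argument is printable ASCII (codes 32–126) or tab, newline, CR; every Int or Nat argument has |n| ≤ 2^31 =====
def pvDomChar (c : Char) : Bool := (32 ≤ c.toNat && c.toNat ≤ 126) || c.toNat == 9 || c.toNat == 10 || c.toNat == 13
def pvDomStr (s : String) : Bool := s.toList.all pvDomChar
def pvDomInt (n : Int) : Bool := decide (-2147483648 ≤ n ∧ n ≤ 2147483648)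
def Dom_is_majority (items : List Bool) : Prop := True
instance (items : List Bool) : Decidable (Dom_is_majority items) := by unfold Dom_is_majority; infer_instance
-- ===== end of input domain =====

-- B replaces A's two-counter pass by a different algorithm: sort the booleans and return the
-- lower-median element sorted(items)[(len(items)-1)//2] (an "alternative" objective, not faster).

-- ===== PORT A =====
def is_majority (items : List Bool) : Bool :=
  -- true_v, false_v = 0, 0; for item in items: …
  let p := items.foldl (fun (s : Int × Int) item =>
    if item then (s.1 + 1, s.2) else (s.1, s.2 + 1)) (0, 0)
  -- return bool(items) and true_v > false_v
  (!items.isEmpty) && decide (p.1 > p.2)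

-- ===== PORT B =====
def is_majority_alt (items : List Bool) : Bool :=
  -- return bool(items) and sorted(items)[(len(items) - 1) // 2]
  (!items.isEmpty) &&
    (PySem.List.pyGet? (PySem.List.sorted items (fun b => if b then (1 : Int) else 0) false)
        (PySem.Int.floordiv ((items.length : Int) - 1) 2)).getD false
  -- pyGet? is guarded by non-emptiness, so the 'none' (IndexError) branch is unreachable

-- ===== PRECONDITION & SPEC =====
def Spec_is_majority (items : List Bool) (out : Bool) : Prop := out = is_majority_alt items
instance (items : List Bool) (out : Bool) : Decidable (Spec_is_majority items out) := by unfold Spec_is_majority; infer_instance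

-- ===== CLAIM (what is proved, stated in full; the proofs are below) =====
def Claim_equal_is_majority : Prop := ∀ (items : List Bool), Dom_is_majority items → Spec_is_majority items (is_majority items)

-- ===== LEMMAS AND PROOFS =====
-- A's fold starting from (a, b) adds the number of true and false elements respectively.
theorem is_majority_foldl (items : List Bool) (a b : Int) :
    items.foldl (fun (s : Int × Int) item =>
      if item then (s.1 + 1, s.2) else (s.1, s.2 + 1)) (a, b)
    = (a + ((items.filter (fun x => x)).length : Int),
       b + ((items.filter (fun x => !x)).length : Int)) := by
  induction items generalizing a b with
  | nil => simp
  | cons x xs ih =>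
    cases x <;> simp [List.foldl_cons, ih] <;> ring

-- A boolean list that is weakly increasing under the 0/1 key is falses-then-trues.
theorem sorted_bool_shape (ys : List Bool)
    (h : ys.Pairwise (fun a b => (if a then (1:Int) else 0) ≤ (if b then (1:Int) else 0))) :
    ys = List.replicate (ys.filter (fun x => !x)).length false
         ++ List.replicate (ys.filter (fun x => x)).length true := by
  induction ys with
  | nil => simp
  | cons y t ih =>
    rcases List.pairwise_cons.mp h with ⟨hy, ht⟩
    cases y with
    | true =>
      -- every later element is true
      have hall : ∀ z ∈ t, z = true := by
        intro z hz
        have h1 := hy z hz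
        cases z
        · norm_num at h1
        · rfl
      have ht0 : t.filter (fun x => !x) = [] := by
        rw [List.filter_eq_nil_iff]; intro z hz; simp [hall z hz]
      have ht1 : t.filter (fun x => x) = t := by
        rw [List.filter_eq_self]; intro z hz; simp [hall z hz]
      have hrec := ih ht
      simp only [List.filter_cons, ht0, ht1] at hrec ⊢
      rw [hrec]
      simp [List.replicate_succ]
    | false =>
      have := ih ht
      simp only [List.filter_cons]
      simpa [List.replicate_succ] using this

theorem sorted_bool_eq (items : List Bool) :
    PySem.List.sorted items (fun b => if b then (1 : Int) else 0) false
    = List.replicate (items.filter (fun x => !x)).length false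
      ++ List.replicate (items.filter (fun x => x)).length true := by
  have hperm := PySem.List.sorted_perm items (fun b => if b then (1 : Int) else 0) false
  have hpw := PySem.List.sorted_pairwise items (fun b => if b then (1 : Int) else 0)
  have hshape := sorted_bool_shape _ hpw
  rw [hshape]
  congr 1 <;> congr 1
  · exact List.Perm.length_eq (hperm.filter _)
  · exact List.Perm.length_eq (hperm.filter _)

theorem filter_length_split (items : List Bool) :
    (items.filter (fun x => x)).length + (items.filter (fun x => !x)).length
    = items.length := by
  induction items with
  | nil => simp
  | cons x xs ih => cases x <;> simp <;> omega

-- ===== VERDICT (by name: the statement is the Claim_ definition above) =====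
theorem is_majority_spec : Claim_equal_is_majority := by
  intro items _
  unfold Spec_is_majority is_majority is_majority_alt
  cases items with
  | nil => simp
  | cons x xs =>
    set l := x :: xs with hl
    have hne : l ≠ [] := by simp [hl]
    simp only [is_majority_foldl, zero_add, sorted_bool_eq]
    set f := (l.filter (fun x => !x)).length with hf
    set t := (l.filter (fun x => x)).length with ht
    have hsplit : t + f = l.length := filter_length_split l
    have hn : 1 ≤ l.length := by simp [hl]
    -- the index (n-1)//2 as a Nat
    have hidx : PySem.Int.floordiv ((l.length : Int) - 1) 2 = (((l.length - 1) / 2 : Nat) : Int) := by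
      have : ((l.length : Int) - 1) = ((l.length - 1 : Nat) : Int) := by omega
      rw [this]
      exact_mod_cast PySem.Int.floordiv_natCast (l.length - 1) 2
    rw [hidx, PySem.List.pyGet?_natCast]
    have hlen : (List.replicate f false ++ List.replicate t true).length = l.length := by
      simp; omega
    have hlt : (l.length - 1) / 2 < l.length := by omega
    rw [List.getElem?_eq_getElem (by rw [hlen]; exact hlt)]
    simp only [Option.getD_some]
    by_cases hcase : f ≤ (l.length - 1) / 2
    · -- index falls in the true block (or there are no falses beyond it)
      have hget : (List.replicate f false ++ List.replicate t true)[(l.length - 1) / 2]'(by rw [hlen]; exact hlt) = true := by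
        rw [List.getElem_append_right (by simpa)]
        exact List.getElem_replicate _
      rw [hget]
      have : (f : Int) < t := by omega
      simp [this]
    · have hget : (List.replicate f false ++ List.replicate t true)[(l.length - 1) / 2]'(by rw [hlen]; exact hlt) = false := by
        rw [List.getElem_append_left (by simpa using by omega)]
        exact List.getElem_replicate _
      rw [hget]
      have : ¬ ((f : Int) < t) := by omega
      simp [this]
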